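-- pv_equiv track=rewrite | github.com/gumaruw/DocuMind | LocalRagV3/pdf_extractor.py | _analyze_line_structure
-- ===== SOURCE A (Python) =====
-- def _analyze_line_structure(line: str) -> str:
--     """Satır yapısını analiz et"""
--     # Boşluk gruplarını ve kelime gruplarını tespit et
--     structure = ''
--     current_type = None
--     count = 0
--
--     for char in line:
--         char_type = 'S' if char.isspace() else 'W'  # Space veya Word
--
--         if char_type != current_type:
--             if current_type:
--                 structure += f"{current_type}{count}"
--             current_type = char_type
--             count = 1
--         else:
--             count += 1
--
--     if current_type:
--         structure += f"{current_type}{count}"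
--
--     return structure
-- ===== SOURCE B (Python) =====
-- def _analyze_line_structure(line: str) -> str:
--     """Satır yapısını analiz et"""
--     if not line:
--         return ''
--     # Pass 1: classify every character.
--     cls = ['S' if ch.isspace() else 'W' for ch in line]
--     n = len(cls)
--     # Pass 2: cut positions = 0, every index where the class changes, n.
--     cuts = [0] + [i for i in range(1, n) if cls[i] != cls[i - 1]] + [n]
--     # Each piece's length is the difference of consecutive cut positions.
--     return ''.join(cls[a] + str(b - a) for a, b in zip(cuts, cuts[1:]))
-- ===== Notes on version B (the rewrite author's own statement) =====
-- stated objective: alternative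
-- what changed: B replaces A's per-character state machine (current_type/count accumulator with an end-of-loop flush) by staged passes: it classifies every character, collects the cut indices where the class changes, and emits each piece with its length computed as the difference of consecutive cut positions.
import Mathlib
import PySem

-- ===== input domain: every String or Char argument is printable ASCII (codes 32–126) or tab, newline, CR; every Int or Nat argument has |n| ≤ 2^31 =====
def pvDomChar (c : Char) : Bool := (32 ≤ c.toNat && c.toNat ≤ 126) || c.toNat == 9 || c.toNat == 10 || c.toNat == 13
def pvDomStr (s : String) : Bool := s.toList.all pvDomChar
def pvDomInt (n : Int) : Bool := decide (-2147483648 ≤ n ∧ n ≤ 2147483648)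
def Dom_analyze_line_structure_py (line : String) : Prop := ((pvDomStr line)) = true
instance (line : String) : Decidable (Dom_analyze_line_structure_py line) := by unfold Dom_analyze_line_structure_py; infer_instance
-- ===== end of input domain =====

-- B replaces A's per-character state machine (running counter + end-of-loop flush) by staged
-- passes: classify every character, collect the cut indices where the class changes, and emit
-- each piece from the difference of consecutive cut positions; objective: alternative.

-- ===== PORT A =====
-- one iteration of A's for-loop over (structure, current_type, count)
def pvAStep (st : String × Option String × Int) (c : Char) : String × Option String × Int :=
  let char_type : String := if PySem.Chars.isspace c then "S" else "W"
  match st with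
  | (struc, current_type, count) =>
    if some char_type ≠ current_type then
      let struc :=
        match current_type with
        | some t => struc ++ t ++ PySem.Int.toStr count
        | none => struc
      (struc, some char_type, 1)
    else
      (struc, current_type, count + 1)

def analyze_line_structure_py (line : String) : String :=
  let st := line.toList.foldl pvAStep ("", none, 0)
  match st.2.1 with
  | some t => st.1 ++ t ++ PySem.Int.toStr st.2.2
  | none => st.1

-- ===== PORT B =====
-- 'S' if ch.isspace() else 'W'
def pvClass (c : Char) : String := if PySem.Chars.isspace c then "S" else "W"

-- ''.join(cls[a] + str(b - a) for a, b in zip(cuts, cuts[1:]))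
def pvJoin (cls : List String) : List (Nat × Nat) → String
  | [] => ""
  | (a, b) :: rest => cls.getD a "" ++ PySem.Int.toStr ((b : Int) - (a : Int)) ++ pvJoin cls rest

-- Python range(1, n) carries only indices in [1, n), so it is ported with Nat indices.
def analyze_line_structure_py_alt (line : String) : String :=
  let cs := line.toList
  if cs.isEmpty then "" else
    let cls := cs.map pvClass
    let n := cls.length
    let cuts := 0 :: ((List.range' 1 (n - 1)).filter
        (fun i => cls.getD i "" ≠ cls.getD (i - 1) "")) ++ [n]
    pvJoin cls (cuts.zip cuts.tail)

-- ===== PRECONDITION & SPEC =====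
def Spec_analyze_line_structure_py (line : String) (out : String) : Prop := out = analyze_line_structure_py_alt line
instance (line : String) (out : String) : Decidable (Spec_analyze_line_structure_py line out) := by unfold Spec_analyze_line_structure_py; infer_instance

-- ===== CLAIM (what is proved, stated in full; the proofs are below) =====
def Claim_equal_analyze_line_structure_py : Prop := ∀ (line : String), Dom_analyze_line_structure_py line → Spec_analyze_line_structure_py line (analyze_line_structure_py line)

-- ===== LEMMAS AND PROOFS =====

-- proof-side reference: run-length encoding by maximal same-class runs
def pvRuns : List Char → String
  | [] => ""
  | c :: rest =>
    let k := PySem.Chars.isspace c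
    let grp := rest.takeWhile (fun x => PySem.Chars.isspace x == k)
    (if k then "S" else "W") ++ PySem.Int.toStr (1 + grp.length) ++
      pvRuns (rest.dropWhile (fun x => PySem.Chars.isspace x == k))
termination_by l => l.length
decreasing_by
  exact Nat.lt_succ_of_le (List.length_dropWhile_le _ _)

-- flushing A's final state, as a function
def pvFlush (st : String × Option String × Int) : String :=
  match st.2.1 with
  | some t => st.1 ++ t ++ PySem.Int.toStr st.2.2
  | none => st.1

-- A-side loop invariant
lemma pvLoop (rest : List Char) (acc : String) (k : Bool) (count : Int) :
    pvFlush (rest.foldl pvAStep (acc, some (if k then "S" else "W"), count))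
      = acc ++ (if k then "S" else "W") ++
          PySem.Int.toStr (count + ((rest.takeWhile (fun x => PySem.Chars.isspace x == k)).length : Int)) ++
          pvRuns (rest.dropWhile (fun x => PySem.Chars.isspace x == k)) := by
  induction rest generalizing acc k count with
  | nil =>
    simp [pvFlush, pvRuns]
  | cons c rest ih =>
    by_cases hc : PySem.Chars.isspace c = k
    · have hstep : pvAStep (acc, some (if k then "S" else "W"), count) c
          = (acc, some (if k then "S" else "W"), count + 1) := by
        simp [pvAStep, hc]
      have htw : (c :: rest).takeWhile (fun x => PySem.Chars.isspace x == k)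
          = c :: rest.takeWhile (fun x => PySem.Chars.isspace x == k) := by
        simp [hc]
      have hdw : (c :: rest).dropWhile (fun x => PySem.Chars.isspace x == k)
          = rest.dropWhile (fun x => PySem.Chars.isspace x == k) := by
        simp [hc]
      rw [List.foldl_cons, hstep, ih, htw, hdw]
      congr 3
      push_cast [List.length_cons]
      ring
    · have hne : (if PySem.Chars.isspace c then "S" else "W") ≠ (if k then "S" else "W") := by
        cases hk : k <;> cases hcc : PySem.Chars.isspace c <;> simp_all
      have hstep : pvAStep (acc, some (if k then "S" else "W"), count) c
          = (acc ++ (if k then "S" else "W") ++ PySem.Int.toStr count,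
             some (if PySem.Chars.isspace c then "S" else "W"), 1) := by
        simp [pvAStep, hne]
      have hdw : (c :: rest).dropWhile (fun x => PySem.Chars.isspace x == k) = c :: rest := by
        simp [hc]
      have htw : (c :: rest).takeWhile (fun x => PySem.Chars.isspace x == k) = [] := by
        simp [hc]
      rw [List.foldl_cons, hstep, ih, htw, hdw, pvRuns]
      simp [String.append_assoc]

-- A equals the run decomposition
lemma pvA_eq_runs (line : String) : analyze_line_structure_py line = pvRuns line.toList := by
  unfold analyze_line_structure_py
  cases h : line.toList with
  | nil => simp [pvRuns]
  | cons c rest =>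
    have hstep : pvAStep ("", none, 0) c
        = ("", some (if PySem.Chars.isspace c then "S" else "W"), 1) := by
      simp [pvAStep]
    have := pvLoop rest "" (PySem.Chars.isspace c) 1
    rw [List.foldl_cons, hstep]
    show pvFlush _ = _
    rw [this, pvRuns]
    simp

def pvBnd (cls : List String) : List Nat :=
  (List.range' 1 (cls.length - 1)).filter (fun i => cls.getD i "" ≠ cls.getD (i - 1) "")

def pvCuts (cls : List String) : List Nat := 0 :: pvBnd cls ++ [cls.length]

lemma pvGetD_rep_left {L : Nat} (t : String) (X : List String) {i : Nat} (h : i < L) :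
    (List.replicate L t ++ X).getD i "" = t := by
  rw [List.getD_eq_getElem?_getD,
    List.getElem?_append_left (l₁ := List.replicate L t) (l₂ := X) (by simpa using h)]
  simp [List.getElem?_replicate, h]

lemma pvGetD_rep_right {L : Nat} (t : String) (X : List String) {i : Nat} (h : L ≤ i) :
    (List.replicate L t ++ X).getD i "" = X.getD (i - L) "" := by
  rw [List.getD_eq_getElem?_getD,
    List.getElem?_append_right (l₁ := List.replicate L t) (l₂ := X) (by simpa using h)]
  simp [List.getD_eq_getElem?_getD]

lemma pvBnd_run (L : Nat) (hL : 1 ≤ L) (t : String) (X : List String)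
    (h0 : X ≠ [] → X.getD 0 "" ≠ t) :
    pvBnd (List.replicate L t ++ X)
      = if X = [] then [] else L :: (pvBnd X).map (fun j => L + j) := by
  have hlen : (List.replicate L t ++ X).length = L + X.length := by simp
  have hsplit : List.range' 1 ((List.replicate L t ++ X).length - 1)
      = List.range' 1 (L - 1) ++ List.range' L X.length := by
    rw [hlen]
    have := List.range'_append (s := 1) (m := L - 1) (n := X.length) (step := 1)
    rw [show 1 + 1 * (L - 1) = L by omega] at this
    rw [show L + X.length - 1 = (L - 1) + X.length by omega, ← this]
  unfold pvBnd
  rw [hsplit, List.filter_append]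
  have h1 : (List.range' 1 (L - 1)).filter
      (fun i => decide ((List.replicate L t ++ X).getD i "" ≠ (List.replicate L t ++ X).getD (i - 1) "")) = [] := by
    rw [List.filter_eq_nil_iff]
    intro i hi
    have hm := List.mem_range'_1.mp hi
    have ha : (List.replicate L t ++ X).getD i "" = t := pvGetD_rep_left t X (by omega)
    have hb : (List.replicate L t ++ X).getD (i - 1) "" = t := pvGetD_rep_left t X (by omega)
    simp only [ha, hb, ne_eq, decide_not, not_not]
    simp
  rw [h1]
  cases hX : X with
  | nil => simp
  | cons r rs =>
    have hXne : X ≠ [] := by simp [hX]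
    rw [← hX]
    have hXlen : X.length = rs.length + 1 := by rw [hX]; simp
    rw [hXlen, List.range'_succ]
    have ha : (List.replicate L t ++ X).getD L "" = X.getD 0 "" := by
      have := pvGetD_rep_right (L := L) t X (i := L) le_rfl
      simpa using this
    have hb : (List.replicate L t ++ X).getD (L - 1) "" = t := pvGetD_rep_left t X (by omega)
    have hcondL : (fun i => decide ((List.replicate L t ++ X).getD i "" ≠ (List.replicate L t ++ X).getD (i - 1) "")) L = true := by
      simp only [ha, hb]
      exact decide_eq_true (h0 hXne)
    have hfcons : List.filter (fun i => decide ((List.replicate L t ++ X).getD i "" ≠ (List.replicate L t ++ X).getD (i - 1) "")) (L :: List.range' (L + 1) rs.length)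
        = L :: List.filter (fun i => decide ((List.replicate L t ++ X).getD i "" ≠ (List.replicate L t ++ X).getD (i - 1) "")) (List.range' (L + 1) rs.length) :=
      List.filter_cons_of_pos hcondL
    rw [hfcons]
    have hrange : List.range' (L + 1) rs.length = (List.range' 1 rs.length).map (fun j => L + j) := by
      rw [List.map_add_range']
    rw [hrange, List.filter_map]
    have hfc : List.filter ((fun i => decide ((List.replicate L t ++ X).getD i "" ≠ (List.replicate L t ++ X).getD (i - 1) "")) ∘ (fun j => L + j)) (List.range' 1 rs.length)
        = List.filter (fun i => decide (X.getD i "" ≠ X.getD (i - 1) "")) (List.range' 1 rs.length) := by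
      apply List.filter_congr
      intro j hj
      have hm := List.mem_range'_1.mp hj
      have ha' : (List.replicate L t ++ X).getD (L + j) "" = X.getD j "" := by
        have := pvGetD_rep_right (L := L) t X (i := L + j) (by omega)
        simpa using this
      have hb' : (List.replicate L t ++ X).getD (L + j - 1) "" = X.getD (j - 1) "" := by
        have := pvGetD_rep_right (L := L) t X (i := L + j - 1) (by omega)
        rw [this, show L + j - 1 - L = j - 1 from by omega]
      simp only [Function.comp_apply, ha', hb']
    rw [hfc]
    simp [pvBnd, hXlen, hXne]

lemma pvJoin_shift (pre cls : List String) (pairs : List (Nat × Nat)) :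
    pvJoin (pre ++ cls) (pairs.map (fun p => (p.1 + pre.length, p.2 + pre.length)))
      = pvJoin cls pairs := by
  induction pairs with
  | nil => rfl
  | cons p rest ih =>
    obtain ⟨a, b⟩ := p
    simp only [List.map_cons, pvJoin, ih]
    congr 2
    · simp [List.getD, List.getElem?_append_right]
    · congr 1
      push_cast
      ring

lemma pvDropHead {α : Type} (p : α → Bool) : ∀ (l : List α) (d : α) (ds : List α),
    l.dropWhile p = d :: ds → p d = false := by
  intro l
  induction l with
  | nil => intro d ds h; simp at h
  | cons a l ih =>
    intro d ds h
    by_cases hp : p a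
    · rw [List.dropWhile_cons_of_pos hp] at h; exact ih d ds h
    · rw [List.dropWhile_cons_of_neg hp] at h
      cases h
      simpa using hp

lemma pvZipCuts (L : Nat) (Y : List Nat) :
    (0 :: ((0 :: Y).map (fun j => L + j))).zip ((0 :: Y).map (fun j => L + j))
      = (0, L) :: (((0 :: Y).zip Y).map (fun p => (p.1 + L, p.2 + L))) := by
  have h1 : (0 :: Y).map (fun j => L + j) = (L + 0) :: Y.map (fun j => L + j) := by simp
  rw [h1, List.zip_cons_cons, ← h1, List.zip_map]
  simp only [Nat.add_zero]
  congr 1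
  apply List.map_congr_left
  intro p _
  simp [Prod.map, Nat.add_comm]

lemma pvRuns_cons (c : Char) (rest : List Char) :
    pvRuns (c :: rest)
      = (if PySem.Chars.isspace c then "S" else "W")
        ++ PySem.Int.toStr (1 + ((rest.takeWhile (fun x => PySem.Chars.isspace x == PySem.Chars.isspace c)).length : Int))
        ++ pvRuns (rest.dropWhile (fun x => PySem.Chars.isspace x == PySem.Chars.isspace c)) := by
  rw [pvRuns]

lemma pvB_runs : ∀ (n : Nat) (cs : List Char), cs.length ≤ n → cs ≠ [] →
    pvJoin (cs.map pvClass) ((pvCuts (cs.map pvClass)).zip (pvCuts (cs.map pvClass)).tail) = pvRuns cs := by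
  intro n
  induction n with
  | zero => intro cs hlen hne; cases cs <;> simp_all
  | succ n ih =>
    intro cs hlen hne
    match cs, hne with
    | c :: rest0, _ =>
    set k := PySem.Chars.isspace c with hk
    set t : String := if k then "S" else "W" with ht
    set grp := rest0.takeWhile (fun x => PySem.Chars.isspace x == k) with hgrp
    set drop := rest0.dropWhile (fun x => PySem.Chars.isspace x == k) with hdrop
    set L := grp.length + 1 with hL
    clear_value k t grp drop L
    have hdc : c :: rest0 = (c :: grp) ++ drop := by
      simp [hgrp, hdrop, List.takeWhile_append_dropWhile]
    have hmaprun : (c :: grp).map pvClass = List.replicate L t := by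
      rw [List.eq_replicate_iff]
      constructor
      · simp [hL]
      · intro b hb
        simp only [List.mem_map] at hb
        obtain ⟨x, hx, rfl⟩ := hb
        rcases List.mem_cons.mp hx with rfl | hx'
        · simp [pvClass, ht, hk]
        · have := List.mem_takeWhile_imp (l := rest0) (p := fun x => PySem.Chars.isspace x == k) (by rwa [← hgrp])
          simp only [beq_iff_eq] at this
          simp [pvClass, ht, this]
    have hmap : (c :: rest0).map pvClass = List.replicate L t ++ drop.map pvClass := by
      rw [hdc, List.map_append, hmaprun]
    have h0 : drop.map pvClass ≠ [] → (drop.map pvClass).getD 0 "" ≠ t := by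
      intro hdne
      have hdne' : drop ≠ [] := by simpa using hdne
      cases hd : drop with
      | nil => exact absurd hd hdne'
      | cons d ds =>
        have hfd : (fun x => PySem.Chars.isspace x == k) d = false :=
          pvDropHead _ rest0 d ds (by rw [← hdrop, hd])
        have hne2 : PySem.Chars.isspace d ≠ k := by simpa using hfd
        show pvClass d ≠ t
        simp only [pvClass, ht]
        cases hdd : PySem.Chars.isspace d <;> cases hkk : k <;>
          first
            | exact absurd (hdd.trans hkk.symm) hne2
            | decide
    have hbnd : pvBnd ((c :: rest0).map pvClass)
        = if drop.map pvClass = [] then [] else L :: (pvBnd (drop.map pvClass)).map (fun j => L + j) := by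
      rw [hmap]; exact pvBnd_run L (by omega) t _ h0
    have hget0 : ((c :: rest0).map pvClass).getD 0 "" = t := by
      rw [hmap]; exact pvGetD_rep_left t _ (by omega)
    have hlencs : ((c :: rest0).map pvClass).length = L + (drop.map pvClass).length := by
      rw [hmap]; simp
    have hruns : pvRuns (c :: rest0) = t ++ PySem.Int.toStr (1 + (grp.length : Int)) ++ pvRuns drop := by
      rw [pvRuns_cons, ← hk, ← hgrp, ← hdrop, ← ht]
    cases hd : drop with
    | nil =>
      have hde : List.map pvClass drop = ([] : List String) := by rw [hd]; rfl
      rw [pvCuts, hbnd, hde, if_pos rfl, hlencs, hde]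
      rw [hruns, hd]
      have hnil : pvRuns ([] : List Char) = "" := by rw [pvRuns]
      rw [hnil]
      simp only [List.singleton_append, List.tail_cons, List.zip_cons_cons,
        List.zip_nil_right, pvJoin, hget0, Nat.cast_zero, Int.sub_zero]
      have harg : ((L + ([] : List String).length : Nat) : Int) = 1 + (grp.length : Int) := by
        simp only [List.length_nil, Nat.add_zero, hL]; push_cast; ring
      rw [harg]
    | cons d ds =>
      have hdne : drop ≠ [] := by simp [hd]
      have hde : List.map pvClass drop ≠ [] := by rw [hd]; simp
      have hih : pvJoin (List.map pvClass drop) ((pvCuts (List.map pvClass drop)).zip (pvCuts (List.map pvClass drop)).tail) = pvRuns drop := by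
        apply ih drop _ hdne
        have h1 : drop.length ≤ rest0.length := by rw [hdrop]; exact List.length_dropWhile_le _ _
        have h2 : rest0.length ≤ n := by simpa using hlen
        omega
      set clsD := List.map pvClass drop with hclsD
      set Y : List Nat := pvBnd clsD ++ [clsD.length] with hY
      have hcutsD : pvCuts clsD = 0 :: Y := by simp [pvCuts, hY]
      have hcuts : pvCuts (List.map pvClass (c :: rest0)) = 0 :: ((0 :: Y).map (fun j => L + j)) := by
        rw [pvCuts, hbnd, if_neg hde, hlencs, hY]
        simp
      rw [hcuts, List.tail_cons, pvZipCuts]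
      have hzt : (0 :: Y).zip Y = (pvCuts clsD).zip (pvCuts clsD).tail := by
        rw [hcutsD, List.tail_cons]
      rw [hzt]
      simp only [pvJoin]
      have hshift : pvJoin (List.map pvClass (c :: rest0))
          (((pvCuts clsD).zip (pvCuts clsD).tail).map (fun p => (p.1 + L, p.2 + L)))
          = pvJoin clsD ((pvCuts clsD).zip (pvCuts clsD).tail) := by
        rw [hmap]
        have := pvJoin_shift (List.replicate L t) clsD ((pvCuts clsD).zip (pvCuts clsD).tail)
        simpa using this
      rw [hshift, hih, hget0, hruns]
      rw [show (((L : Nat) : Int) - ((0 : Nat) : Int)) = 1 + (grp.length : Int) from by rw [hL]; push_cast; ring]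

-- B equals the run decomposition
lemma pvAlt_eq_runs (line : String) : analyze_line_structure_py_alt line = pvRuns line.toList := by
  unfold analyze_line_structure_py_alt
  cases h : line.toList with
  | nil => rw [pvRuns]; rfl
  | cons c rest =>
    rw [if_neg (by simp)]
    exact pvB_runs (c :: rest).length (c :: rest) le_rfl (by simp)

-- ===== VERDICT (by name: the statement is the Claim_ definition above) =====
theorem analyze_line_structure_py_spec : Claim_equal_analyze_line_structure_py := by
  intro line _
  show analyze_line_structure_py line = analyze_line_structure_py_alt line
  rw [pvA_eq_runs, pvAlt_eq_runs]
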